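-- pv_equiv track=rewrite | github.com/nightofknife/Aura_script | plans/yihuan/src/services/mahjong_service.py | _contiguous_runs
-- ===== SOURCE A (Python) =====
-- def _contiguous_runs(values: list[int]) -> list[tuple[int, int]]:
--     if not values:
--         return []
--     runs: list[tuple[int, int]] = []
--     start = int(values[0])
--     previous = int(values[0])
--     for raw_value in values[1:]:
--         value = int(raw_value)
--         if value == previous + 1:
--             previous = value
--             continue
--         runs.append((start, previous))
--         start = value
--         previous = value
--     runs.append((start, previous))
--     return runs
-- ===== SOURCE B (Python) =====
-- def _contiguous_runs(values: list[int]) -> list[tuple[int, int]]: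
--     # Backward traversal: walk the list right-to-left; each element either extends
--     # downward the most recently built run (when that run starts at value+1) or
--     # opens a new singleton run. Runs accumulate in reverse order; one final
--     # reverse restores left-to-right order.
--     rev: list[tuple[int, int]] = []
--     for raw_value in reversed(values):
--         value = int(raw_value)
--         if rev and rev[-1][0] == value + 1:
--             rev[-1] = (value, rev[-1][1])
--         else:
--             rev.append((value, value))
--     rev.reverse()
--     return rev
-- ===== Notes on version B (the rewrite author's own statement) =====
-- stated objective: alternative
-- what changed: A scans left-to-right with a (runs, start, previous) accumulator that flushes a finished run at each break; B traverses right-to-left, extending the most recently built run downward or opening a singleton, building the output back-to-front and reversing once at the end.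
import Mathlib
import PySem

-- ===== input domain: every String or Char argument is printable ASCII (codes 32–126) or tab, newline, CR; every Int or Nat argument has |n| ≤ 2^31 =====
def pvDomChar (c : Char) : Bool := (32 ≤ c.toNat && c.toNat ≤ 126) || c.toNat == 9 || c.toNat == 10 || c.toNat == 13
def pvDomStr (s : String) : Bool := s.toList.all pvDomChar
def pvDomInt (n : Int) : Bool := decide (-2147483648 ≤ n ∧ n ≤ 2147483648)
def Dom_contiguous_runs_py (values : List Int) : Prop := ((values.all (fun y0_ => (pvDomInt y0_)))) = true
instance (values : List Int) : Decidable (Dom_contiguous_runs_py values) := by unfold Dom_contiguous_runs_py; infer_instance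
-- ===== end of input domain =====

-- B replaces A's forward scan (flushing a pending run at each break) by a backward
-- traversal that extends the most recently built run downward, building the output
-- back-to-front and reversing once (alternative decomposition, same cost).


-- ===== PORT A =====
-- A: one fold over values[1:] with state (runs, start, previous); int(x) on an int is identity.
def contiguous_runs_py (values : List Int) : List (Int × Int) :=
  match values with
  | [] => []
  | v :: rest =>
    let st := rest.foldl
      (fun (st : List (Int × Int) × Int × Int) value =>
        let (runs, start, previous) := st
        if value = previous + 1 then (runs, start, value)
        else (runs ++ [(start, previous)], value, value))
      ([], v, v)
    st.1 ++ [(st.2.1, st.2.2)]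

-- ===== PORT B =====
-- B: fold over reversed(values); `rev[-1]` is getLast?, `rev[-1] = …` is dropLast ++ [_],
-- `rev.append(…)` is ++ [_]; then one final reverse.
def contiguous_runs_py_alt (values : List Int) : List (Int × Int) :=
  let rev := values.reverse.foldl
    (fun (rev : List (Int × Int)) value =>
      match rev.getLast? with
      | some (a, b) => if a = value + 1 then rev.dropLast ++ [(value, b)] else rev ++ [(value, value)]
      | none => [(value, value)])
    []
  rev.reverse

-- ===== PRECONDITION & SPEC =====
def Spec_contiguous_runs_py (values : List Int) (out : List (Int × Int)) : Prop := out = contiguous_runs_py_alt values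
instance (values : List Int) (out : List (Int × Int)) : Decidable (Spec_contiguous_runs_py values out) := by unfold Spec_contiguous_runs_py; infer_instance

-- ===== CLAIM (what is proved, stated in full; the proofs are below) =====
def Claim_equal_contiguous_runs_py : Prop := ∀ (values : List Int), Dom_contiguous_runs_py values → Spec_contiguous_runs_py values (contiguous_runs_py values)

-- ===== LEMMAS AND PROOFS =====

-- The cons-side view of B's step: prepend to / merge into the head of the run list.
def pvStep (v : Int) (runs : List (Int × Int)) : List (Int × Int) :=
  match runs with
  | (a, b) :: rs => if a = v + 1 then (v, b) :: rs else (v, v) :: (a, b) :: rs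
  | [] => [(v, v)]

-- B's append-at-end step, applied to R.reverse, is pvStep applied at the head of R.
theorem pvStep_rev (v : Int) (R : List (Int × Int)) :
    (match R.reverse.getLast? with
      | some (a, b) => if a = v + 1 then R.reverse.dropLast ++ [(v, b)] else R.reverse ++ [(v, v)]
      | none => [(v, v)]) = (pvStep v R).reverse := by
  cases R with
  | nil => simp [pvStep]
  | cons hd tl =>
    obtain ⟨a, b⟩ := hd
    simp only [pvStep, List.getLast?_reverse, List.head?_cons, List.dropLast_reverse, List.tail_cons]
    by_cases h : a = v + 1 <;> simp [h]

-- B's fold, started from R.reverse, is the reverse of folding pvStep from R.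
theorem pvFoldB_rev (l : List Int) : ∀ (R : List (Int × Int)),
    l.foldl
      (fun (rev : List (Int × Int)) value =>
        match rev.getLast? with
        | some (a, b) => if a = value + 1 then rev.dropLast ++ [(value, b)] else rev ++ [(value, value)]
        | none => [(value, value)])
      R.reverse
    = (l.foldl (fun R v => pvStep v R) R).reverse := by
  induction l with
  | nil => intro R; rfl
  | cons v l ih =>
    intro R
    simp only [List.foldl_cons]
    rw [show (match R.reverse.getLast? with
      | some (a, b) => if a = v + 1 then R.reverse.dropLast ++ [(v, b)] else R.reverse ++ [(v, v)]
      | none => [(v, v)]) = (pvStep v R).reverse from pvStep_rev v R]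
    exact ih (pvStep v R)

-- B computes the right fold of pvStep.
theorem pvAlt_eq_foldr (values : List Int) :
    contiguous_runs_py_alt values = values.foldr pvStep [] := by
  unfold contiguous_runs_py_alt
  have h := pvFoldB_rev values.reverse ([] : List (Int × Int))
  simp only [List.reverse_nil] at h
  simp only [h, List.reverse_reverse, List.foldl_reverse]

-- Merging a pending run (s, p) into an already-built run list.
def pvMerge (s p : Int) (runs : List (Int × Int)) : List (Int × Int) :=
  match runs with
  | (a, b) :: rs => if a = p + 1 then (s, b) :: rs else (s, p) :: (a, b) :: rs
  | [] => [(s, p)]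

-- A's fold, flushed with its final (start, previous), equals the pending run merged
-- into the foldr-of-pvStep of the remaining elements — the bridging invariant.
theorem pvFoldA_eq (xs : List Int) : ∀ (r0 : List (Int × Int)) (s p : Int),
    ((xs.foldl
        (fun (st : List (Int × Int) × Int × Int) value =>
          let (runs, start, previous) := st
          if value = previous + 1 then (runs, start, value)
          else (runs ++ [(start, previous)], value, value))
        (r0, s, p)).1 ++ [((xs.foldl
        (fun (st : List (Int × Int) × Int × Int) value =>
          let (runs, start, previous) := st
          if value = previous + 1 then (runs, start, value)
          else (runs ++ [(start, previous)], value, value))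
        (r0, s, p)).2.1, (xs.foldl
        (fun (st : List (Int × Int) × Int × Int) value =>
          let (runs, start, previous) := st
          if value = previous + 1 then (runs, start, value)
          else (runs ++ [(start, previous)], value, value))
        (r0, s, p)).2.2)])
    = r0 ++ pvMerge s p (xs.foldr pvStep []) := by
  induction xs with
  | nil => intro r0 s p; simp [pvMerge]
  | cons x xs ih =>
    intro r0 s p
    simp only [List.foldl_cons, List.foldr_cons]
    by_cases h : x = p + 1
    · subst h
      simp only [reduceIte]
      rw [ih r0 s (p + 1)]
      congr 1
      cases hR : xs.foldr pvStep [] with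
      | nil => simp [pvMerge, pvStep]
      | cons hd rs =>
        obtain ⟨a, b⟩ := hd
        by_cases ha : a = (p + 1) + 1 <;> simp [pvMerge, pvStep, ha]
    · simp only [if_neg h]
      rw [ih (r0 ++ [(s, p)]) x x]
      rw [List.append_assoc]
      congr 1
      cases hR : xs.foldr pvStep [] with
      | nil => simp [pvMerge, pvStep, h]
      | cons hd rs =>
        obtain ⟨a, b⟩ := hd
        by_cases ha : a = x + 1 <;> simp [pvMerge, pvStep, ha, h]

-- ===== VERDICT (by name: the statement is the Claim_ definition above) =====
theorem contiguous_runs_py_spec : Claim_equal_contiguous_runs_py := by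
  intro values _
  unfold Spec_contiguous_runs_py
  rw [pvAlt_eq_foldr]
  unfold contiguous_runs_py
  match values with
  | [] => rfl
  | v :: rest =>
    simp only [List.foldr_cons]
    rw [pvFoldA_eq rest [] v v]
    simp only [List.nil_append]
    cases hR : rest.foldr pvStep [] with
    | nil => simp [pvMerge, pvStep]
    | cons hd rs =>
      obtain ⟨a, b⟩ := hd
      by_cases ha : a = v + 1 <;> simp [pvMerge, pvStep, ha]
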